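-- pv_equiv track=rewrite | github.com/gigo-gigo/atcoder | abc/abc439/d.py | solve
-- ===== SOURCE A (Python) =====
-- from bisect import bisect_left, bisect_right
-- from collections import defaultdict
--
-- def solve(N, A):
--     X7 = defaultdict(list)
--     X3 = defaultdict(list)
--     for i, a in enumerate(A):
--         x = a * 5 // 7
--         if 7 * x == 5 * a:
--             X7[x].append(i)
--
--         x = a * 5 // 3
--         if 3 * x == 5 * a:
--             X3[x].append(i)
--
--     ans = 0
--     for j, a in enumerate(A):
--         m = bisect_left(X7[a], j)
--         n = bisect_left(X3[a], j)
--         ans += m * n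
--
--         m = len(X7[a]) - bisect_right(X7[a], j)
--         n = len(X3[a]) - bisect_right(X3[a], j)
--         ans += m * n
--
--     return ans
-- ===== SOURCE B (Python) =====
-- from collections import Counter
--
-- def solve(N, A):
--     # One pass: keep value counts to the left and right of j and look up the
--     # target values 7*a/5 and 3*a/5 directly (no index lists, no bisect).
--     left = Counter()
--     right = Counter(A)
--     ans = 0
--     for a in A:
--         right[a] -= 1
--         if a % 5 == 0:
--             t7 = 7 * a // 5
--             t3 = 3 * a // 5
--             ans += left[t7] * left[t3] + right[t7] * right[t3]
--         left[a] += 1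
--     return ans
-- ===== Notes on version B (the rewrite author's own statement) =====
-- stated objective: alternative
-- what changed: Replaces the per-value sorted index lists plus four bisect searches per element by a single pass that maintains left/right value counters and looks up the two target values 7a/5 and 3a/5 directly.
import Mathlib
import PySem

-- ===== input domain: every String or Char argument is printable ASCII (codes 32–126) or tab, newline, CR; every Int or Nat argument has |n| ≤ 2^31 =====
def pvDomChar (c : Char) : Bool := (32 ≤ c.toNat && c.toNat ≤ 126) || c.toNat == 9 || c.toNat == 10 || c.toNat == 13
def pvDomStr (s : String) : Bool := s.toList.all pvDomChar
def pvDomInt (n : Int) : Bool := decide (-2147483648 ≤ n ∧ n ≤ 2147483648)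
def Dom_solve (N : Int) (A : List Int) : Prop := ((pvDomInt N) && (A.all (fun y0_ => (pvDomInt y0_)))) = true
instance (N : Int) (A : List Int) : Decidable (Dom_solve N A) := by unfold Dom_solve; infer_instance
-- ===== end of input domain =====

-- B replaces the per-value sorted index lists and bisect lookups of A by one
-- pass with incremental left/right value counters that looks the two target values up directly.

-- ===== PORT A =====
-- first loop body: conditionally append index i to X7[x7] and X3[x3]
def solveBuildStep (st : PySem.Dict Int (List Int) × PySem.Dict Int (List Int))
    (p : Int × Int) : PySem.Dict Int (List Int) × PySem.Dict Int (List Int) :=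
  let i := p.1
  let a := p.2
  let x7 := PySem.Int.floordiv (a * 5) 7
  let d7 := if 7 * x7 = 5 * a then st.1.modify x7 [] (· ++ [i]) else st.1
  let x3 := PySem.Int.floordiv (a * 5) 3
  let d3 := if 3 * x3 = 5 * a then st.2.modify x3 [] (· ++ [i]) else st.2
  (d7, d3)

-- second loop body: the four bisect counts around index j
def solveCountStep (st : PySem.Dict Int (List Int) × PySem.Dict Int (List Int))
    (ans : Int) (p : Int × Int) : Int :=
  let j := p.1
  let a := p.2
  let L7 := st.1.getD a []
  let L3 := st.2.getD a []
  let m := PySem.List.bisectLeft L7 j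
  let n := PySem.List.bisectLeft L3 j
  let m2 := L7.length - PySem.List.bisectRight L7 j
  let n2 := L3.length - PySem.List.bisectRight L3 j
  ans + (m * n : Nat) + (m2 * n2 : Nat)

def solve (N : Int) (A : List Int) : Int :=
  let st := (PySem.List.enumerate A 0).foldl solveBuildStep
    (PySem.Dict.empty, PySem.Dict.empty)
  (PySem.List.enumerate A 0).foldl (solveCountStep st) 0

-- ===== PORT B =====
-- loop body: move a from the right counter to the left one, adding the two
-- products of direct target-value lookups in between
def solveAltStep (st : PySem.Dict Int Int × PySem.Dict Int Int × Int)
    (a : Int) : PySem.Dict Int Int × PySem.Dict Int Int × Int :=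
  let left := st.1
  let right := st.2.1.modify a 0 (· - 1)
  let ans :=
    if PySem.Int.mod a 5 = 0 then
      let t7 := PySem.Int.floordiv (7 * a) 5
      let t3 := PySem.Int.floordiv (3 * a) 5
      st.2.2 + left.getD t7 0 * left.getD t3 0 + right.getD t7 0 * right.getD t3 0
    else st.2.2
  (left.modify a 0 (· + 1), right, ans)

def solve_alt (N : Int) (A : List Int) : Int :=
  (A.foldl solveAltStep (PySem.Dict.empty, PySem.Dict.counter A, 0)).2.2

-- ===== PRECONDITION & SPEC =====
def Spec_solve (N : Int) (A : List Int) (out : Int) : Prop := out = solve_alt N A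
instance (N : Int) (A : List Int) (out : Int) : Decidable (Spec_solve N A out) := by unfold Spec_solve; infer_instance

-- ===== CLAIM (what is proved, stated in full; the proofs are below) =====
def Claim_equal_solve : Prop := ∀ (N : Int) (A : List Int), Dom_solve N A → Spec_solve N A (solve N A)

-- ===== LEMMAS AND PROOFS =====

-- counts of values in the 7:5 (resp. 3:5) ratio with a
def c7 (a : Int) (xs : List Int) : Int := (xs.countP (fun v => decide (5 * v = 7 * a)) : Int)
def c3 (a : Int) (xs : List Int) : Int := (xs.countP (fun v => decide (5 * v = 3 * a)) : Int)

-- common specification: sum over middle positions of left-pair and right-pair products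
def gSpec : List Int → List Int → Int
  | _, [] => 0
  | pre, a :: rest =>
      c7 a pre * c3 a pre + c7 a rest * c3 a rest + gSpec (pre ++ [a]) rest

-- indices (first components) of the pairs whose value satisfies P, in order
def idxP (l : List (Int × Int)) (P : Int → Bool) : List Int :=
  (l.filter (fun p => P p.2)).map (·.1)

-- ---- arithmetic on the ratio predicates ----

theorem count_t7 (a : Int) (xs : List Int) (h : PySem.Int.mod a 5 = 0) :
    (xs.count (PySem.Int.floordiv (7 * a) 5) : Int) = c7 a xs := by
  rw [PySem.Int.mod_eq_zero_iff_dvd] at h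
  obtain ⟨b, rfl⟩ := h
  have ht : PySem.Int.floordiv (7 * (5 * b)) 5 = 7 * b := by
    rw [PySem.Int.floordiv_eq_ediv_of_pos (by norm_num)]; omega
  rw [ht, List.count_eq_countP, c7]
  congr 1
  exact List.countP_congr (fun v _ => by constructor <;> (intro h'; simp at h' ⊢; omega))

theorem count_t3 (a : Int) (xs : List Int) (h : PySem.Int.mod a 5 = 0) :
    (xs.count (PySem.Int.floordiv (3 * a) 5) : Int) = c3 a xs := by
  rw [PySem.Int.mod_eq_zero_iff_dvd] at h
  obtain ⟨b, rfl⟩ := h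
  have ht : PySem.Int.floordiv (3 * (5 * b)) 5 = 3 * b := by
    rw [PySem.Int.floordiv_eq_ediv_of_pos (by norm_num)]; omega
  rw [ht, List.count_eq_countP, c3]
  congr 1
  exact List.countP_congr (fun v _ => by constructor <;> (intro h'; simp at h' ⊢; omega))

theorem c7_zero (a : Int) (xs : List Int) (h : ¬ PySem.Int.mod a 5 = 0) : c7 a xs = 0 := by
  rw [PySem.Int.mod_eq_zero_iff_dvd] at h
  have : xs.countP (fun v => decide (5 * v = 7 * a)) = 0 :=
    List.countP_eq_zero.mpr (fun v _ => by simp; intro h'; exact h ⟨7 * v - 4 * a, by omega⟩)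
  simp [c7, this]

theorem c3_zero (a : Int) (xs : List Int) (h : ¬ PySem.Int.mod a 5 = 0) : c3 a xs = 0 := by
  rw [PySem.Int.mod_eq_zero_iff_dvd] at h
  have : xs.countP (fun v => decide (5 * v = 3 * a)) = 0 :=
    List.countP_eq_zero.mpr (fun v _ => by simp; intro h'; exact h ⟨2 * v - a, by omega⟩)
  simp [c3, this]

-- ---- B side ----

theorem alt_loop (rest : List Int) : ∀ (pre : List Int)
    (L R : PySem.Dict Int Int) (ans : Int),
    (∀ v, L.getD v 0 = (pre.count v : Int)) →
    (∀ v, R.getD v 0 = (rest.count v : Int)) →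
    (rest.foldl solveAltStep (L, R, ans)).2.2 = ans + gSpec pre rest := by
  induction rest with
  | nil => intro pre L R ans _ _; simp [gSpec]
  | cons a rest ih =>
    intro pre L R ans hL hR
    simp only [List.foldl_cons]
    have hR' : ∀ v, ((R.modify a 0 (· - 1)).getD v 0) = (rest.count v : Int) := by
      intro v
      by_cases hv : v = a
      · subst hv
        rw [PySem.Dict.getD_modify_self, hR]
        simp [List.count_cons]
      · rw [PySem.Dict.getD_modify_of_ne _ _ _ hv, hR, List.count_cons]
        simp [hv, Ne.symm hv]
    have hL' : ∀ v, ((L.modify a 0 (· + 1)).getD v 0) = ((pre ++ [a]).count v : Int) := by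
      intro v
      by_cases hv : v = a
      · subst hv
        rw [PySem.Dict.getD_modify_self, hL]
        simp [List.count_append]
      · rw [PySem.Dict.getD_modify_of_ne _ _ _ hv, hL, List.count_append]
        simp [List.count_singleton, hv, Ne.symm hv]
    rw [show solveAltStep (L, R, ans) a = (L.modify a 0 (· + 1), R.modify a 0 (· - 1),
        if PySem.Int.mod a 5 = 0 then
          ans + L.getD (PySem.Int.floordiv (7 * a) 5) 0 * L.getD (PySem.Int.floordiv (3 * a) 5) 0 +
            (R.modify a 0 (· - 1)).getD (PySem.Int.floordiv (7 * a) 5) 0 *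
              (R.modify a 0 (· - 1)).getD (PySem.Int.floordiv (3 * a) 5) 0
        else ans) from rfl]
    rw [ih (pre ++ [a]) _ _ _ hL' hR']
    show (if PySem.Int.mod a 5 = 0 then _ else ans) + gSpec (pre ++ [a]) rest = ans + gSpec pre (a :: rest)
    rw [gSpec]
    by_cases h5 : PySem.Int.mod a 5 = 0
    · rw [if_pos h5, hL, hL, hR', hR', count_t7 a pre h5, count_t3 a pre h5,
        count_t7 a rest h5, count_t3 a rest h5]
      ring
    · rw [if_neg h5, c7_zero a pre h5, c3_zero a rest h5]
      ring

theorem solve_alt_eq_gSpec (N : Int) (A : List Int) : solve_alt N A = gSpec [] A := by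
  have := alt_loop A [] PySem.Dict.empty (PySem.Dict.counter A) 0
    (fun v => rfl) (fun v => PySem.Dict.getD_counter A v)
  simpa [solve_alt] using this

-- ---- A side: the built dictionaries ----

theorem idxP_cons (i a : Int) (l : List (Int × Int)) (P : Int → Bool) :
    idxP ((i, a) :: l) P = (if P a then [i] else []) ++ idxP l P := by
  simp only [idxP, List.filter_cons]
  split <;> simp

theorem step_getD7 (d7 d3 : PySem.Dict Int (List Int)) (i a k : Int) :
    ((solveBuildStep (d7, d3) (i, a)).1).getD k [] =
      d7.getD k [] ++ (if 5 * a = 7 * k then [i] else []) := by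
  show ((if 7 * PySem.Int.floordiv (a * 5) 7 = 5 * a then
      d7.modify (PySem.Int.floordiv (a * 5) 7) [] (· ++ [i]) else d7)).getD k [] = _
  by_cases hk : 5 * a = 7 * k
  · have hx : PySem.Int.floordiv (a * 5) 7 = k := by
      rw [PySem.Int.floordiv_eq_ediv_of_pos (by norm_num)]; omega
    rw [hx, if_pos (by omega), PySem.Dict.getD_modify_self, if_pos hk]
  · rw [if_neg hk]
    by_cases hc : 7 * PySem.Int.floordiv (a * 5) 7 = 5 * a
    · rw [if_pos hc, PySem.Dict.getD_modify_of_ne _ _ _ (by intro h; subst h; omega)]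
      simp
    · rw [if_neg hc]
      simp

theorem step_getD3 (d7 d3 : PySem.Dict Int (List Int)) (i a k : Int) :
    ((solveBuildStep (d7, d3) (i, a)).2).getD k [] =
      d3.getD k [] ++ (if 5 * a = 3 * k then [i] else []) := by
  show ((if 3 * PySem.Int.floordiv (a * 5) 3 = 5 * a then
      d3.modify (PySem.Int.floordiv (a * 5) 3) [] (· ++ [i]) else d3)).getD k [] = _
  by_cases hk : 5 * a = 3 * k
  · have hx : PySem.Int.floordiv (a * 5) 3 = k := by
      rw [PySem.Int.floordiv_eq_ediv_of_pos (by norm_num)]; omega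
    rw [hx, if_pos (by omega), PySem.Dict.getD_modify_self, if_pos hk]
  · rw [if_neg hk]
    by_cases hc : 3 * PySem.Int.floordiv (a * 5) 3 = 5 * a
    · rw [if_pos hc, PySem.Dict.getD_modify_of_ne _ _ _ (by intro h; subst h; omega)]
      simp
    · rw [if_neg hc]
      simp

theorem build_getD7 (l : List (Int × Int)) :
    ∀ (d7 d3 : PySem.Dict Int (List Int)) (k : Int),
    ((l.foldl solveBuildStep (d7, d3)).1).getD k [] =
      d7.getD k [] ++ idxP l (fun v => decide (5 * v = 7 * k)) := by
  induction l with
  | nil => intro d7 d3 k; simp [idxP]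
  | cons p l ih =>
    intro d7 d3 k
    obtain ⟨i, a⟩ := p
    simp only [List.foldl_cons]
    rw [ih (solveBuildStep (d7, d3) (i, a)).1 (solveBuildStep (d7, d3) (i, a)).2 k,
      step_getD7, idxP_cons]
    simp [List.append_assoc]

theorem build_getD3 (l : List (Int × Int)) :
    ∀ (d7 d3 : PySem.Dict Int (List Int)) (k : Int),
    ((l.foldl solveBuildStep (d7, d3)).2).getD k [] =
      d3.getD k [] ++ idxP l (fun v => decide (5 * v = 3 * k)) := by
  induction l with
  | nil => intro d7 d3 k; simp [idxP]
  | cons p l ih =>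
    intro d7 d3 k
    obtain ⟨i, a⟩ := p
    simp only [List.foldl_cons]
    rw [ih (solveBuildStep (d7, d3) (i, a)).1 (solveBuildStep (d7, d3) (i, a)).2 k,
      step_getD3, idxP_cons]
    simp [List.append_assoc]

theorem idxP_sorted (A : List Int) (s : Int) (P : Int → Bool) :
    (idxP (PySem.List.enumerate A s) P).Pairwise (· < ·) := by
  have hsub : (idxP (PySem.List.enumerate A s) P).Sublist
      ((PySem.List.enumerate A s).map (fun p : Int × Int => p.1)) := by
    unfold idxP
    exact List.Sublist.map (fun p : Int × Int => p.1) List.filter_sublist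
  have : ((PySem.List.enumerate A s).map (·.1)).Pairwise (· < ·) := by
    rw [PySem.List.map_fst_enumerate]
    exact PySem.List.pairwise_lt_pyRange_one _ _
  exact this.sublist hsub

-- ---- bisect counts on a sorted list ----

theorem bisectLeft_eq_countP (L : List Int) (x : Int)
    (h : L.Pairwise (fun a b => a ≤ b)) :
    PySem.List.bisectLeft L x = L.countP (fun y => decide (y < x)) := by
  obtain ⟨hle, hlt, hge⟩ := PySem.List.bisectLeft_spec L x h
  conv_rhs => rw [← List.take_append_drop (PySem.List.bisectLeft L x) L]
  rw [List.countP_append]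
  have h1 : (L.take (PySem.List.bisectLeft L x)).countP (fun y => decide (y < x)) =
      (L.take (PySem.List.bisectLeft L x)).length := by
    apply List.countP_eq_length.mpr
    intro y hy
    obtain ⟨j, hj, rfl⟩ := List.mem_iff_getElem.mp hy
    have hj' : j < PySem.List.bisectLeft L x := by
      have := hj; simp [List.length_take] at this; omega
    simp only [List.getElem_take]
    exact decide_eq_true (hlt j (by simp at hj; omega) hj')
  have h2 : (L.drop (PySem.List.bisectLeft L x)).countP (fun y => decide (y < x)) = 0 := by
    apply List.countP_eq_zero.mpr
    intro y hy
    obtain ⟨j, hj, rfl⟩ := List.mem_iff_getElem.mp hy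
    simp only [List.getElem_drop]
    have := hge (PySem.List.bisectLeft L x + j) (by simp at hj; omega) (by omega)
    simp
    omega
  rw [h1, h2, List.length_take]
  omega

theorem bisectRight_eq_countP (L : List Int) (x : Int)
    (h : L.Pairwise (fun a b => a ≤ b)) :
    L.length - PySem.List.bisectRight L x = L.countP (fun y => decide (x < y)) := by
  obtain ⟨hle, hlt, hge⟩ := PySem.List.bisectRight_spec L x h
  conv_rhs => rw [← List.take_append_drop (PySem.List.bisectRight L x) L]
  rw [List.countP_append]
  have h1 : (L.take (PySem.List.bisectRight L x)).countP (fun y => decide (x < y)) = 0 := by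
    apply List.countP_eq_zero.mpr
    intro y hy
    obtain ⟨j, hj, rfl⟩ := List.mem_iff_getElem.mp hy
    have hj' : j < PySem.List.bisectRight L x := by
      have := hj; simp [List.length_take] at this; omega
    simp only [List.getElem_take]
    have := hlt j (by simp at hj; omega) hj'
    simp
    omega
  have h2 : (L.drop (PySem.List.bisectRight L x)).countP (fun y => decide (x < y)) =
      (L.drop (PySem.List.bisectRight L x)).length := by
    apply List.countP_eq_length.mpr
    intro y hy
    obtain ⟨j, hj, rfl⟩ := List.mem_iff_getElem.mp hy
    simp only [List.getElem_drop]
    exact decide_eq_true (hge (PySem.List.bisectRight L x + j) (by simp at hj; omega) (by omega))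
  rw [h1, h2, List.length_drop]
  omega

-- ---- relating index-list counts to prefix/suffix value counts ----

theorem countP_lt_idxP (A : List Int) : ∀ (s j : Int) (P : Int → Bool),
    (idxP (PySem.List.enumerate A s) P).countP (fun i => decide (i < j)) =
      (A.take (j - s).toNat).countP P := by
  induction A with
  | nil => intro s j P; simp [idxP]
  | cons a A ih =>
    intro s j P
    rw [PySem.List.enumerate_cons, idxP_cons, List.countP_append, ih (s + 1) j P]
    by_cases hsj : s < j
    · have h1 : (j - s).toNat = (j - (s + 1)).toNat + 1 := by omega
      rw [h1, List.take_succ_cons, List.countP_cons]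
      cases hP : P a
      · simp [hP]
      · simp [hP, hsj]
        omega
    · have h0 : (j - s).toNat = 0 := by omega
      have h0' : (j - (s + 1)).toNat = 0 := by omega
      rw [h0, h0']
      cases hP : P a <;> simp [hP, hsj]

theorem countP_gt_idxP (A : List Int) : ∀ (s j : Int) (P : Int → Bool),
    (idxP (PySem.List.enumerate A s) P).countP (fun i => decide (j < i)) =
      (A.drop (j + 1 - s).toNat).countP P := by
  induction A with
  | nil => intro s j P; simp [idxP]
  | cons a A ih =>
    intro s j P
    rw [PySem.List.enumerate_cons, idxP_cons, List.countP_append, ih (s + 1) j P]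
    by_cases hsj : j < s
    · have h0 : (j + 1 - s).toNat = 0 := by omega
      have h0' : (j + 1 - (s + 1)).toNat = 0 := by omega
      rw [h0, h0', List.drop_zero, List.drop_zero, List.countP_cons]
      cases hP : P a
      · simp [hP]
      · simp [hP, hsj]
        omega
    · have h1 : (j + 1 - s).toNat = (j + 1 - (s + 1)).toNat + 1 := by omega
      rw [h1, List.drop_succ_cons]
      cases hP : P a <;> simp [hP, hsj]

-- ---- A side: the counting loop ----

theorem main_loop (A : List Int) (X7 X3 : PySem.Dict Int (List Int))
    (h7 : ∀ k, X7.getD k [] = idxP (PySem.List.enumerate A 0) (fun v => decide (5 * v = 7 * k)))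
    (h3 : ∀ k, X3.getD k [] = idxP (PySem.List.enumerate A 0) (fun v => decide (5 * v = 3 * k))) :
    ∀ (rest pre : List Int) (ans : Int), A = pre ++ rest →
    (PySem.List.enumerate rest (pre.length : Int)).foldl (solveCountStep (X7, X3)) ans =
      ans + gSpec pre rest := by
  intro rest
  induction rest with
  | nil => intro pre ans _; simp [gSpec]
  | cons a rest ih =>
    intro pre ans hA
    rw [PySem.List.enumerate_cons, List.foldl_cons]
    have hterm : solveCountStep (X7, X3) ans ((pre.length : Int), a) =
        ans + c7 a pre * c3 a pre + c7 a rest * c3 a rest := by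
      show ans + ((PySem.List.bisectLeft (X7.getD a []) (pre.length : Int) *
            PySem.List.bisectLeft (X3.getD a []) (pre.length : Int) : Nat) : Int) +
          ((((X7.getD a []).length - PySem.List.bisectRight (X7.getD a []) (pre.length : Int)) *
            ((X3.getD a []).length - PySem.List.bisectRight (X3.getD a []) (pre.length : Int)) : Nat) : Int) =
          ans + c7 a pre * c3 a pre + c7 a rest * c3 a rest
      rw [h7 a, h3 a]
      rw [bisectLeft_eq_countP _ _ ((idxP_sorted A 0 _).imp (fun h => le_of_lt h)),
        bisectLeft_eq_countP _ _ ((idxP_sorted A 0 _).imp (fun h => le_of_lt h)),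
        bisectRight_eq_countP _ _ ((idxP_sorted A 0 _).imp (fun h => le_of_lt h)),
        bisectRight_eq_countP _ _ ((idxP_sorted A 0 _).imp (fun h => le_of_lt h)),
        countP_lt_idxP A 0, countP_lt_idxP A 0, countP_gt_idxP A 0, countP_gt_idxP A 0]
      subst hA
      rw [show ((pre.length : Int) - 0).toNat = pre.length from by omega,
        show ((pre.length : Int) + 1 - 0).toNat = pre.length + 1 from by omega,
        List.take_left' rfl,
        show pre ++ a :: rest = (pre ++ [a]) ++ rest from by simp,
        List.drop_left' (by simp)]
      unfold c7 c3
      push_cast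
      ring
    rw [hterm,
      show ((pre.length : Int) + 1) = (((pre ++ [a]).length : Nat) : Int) from by simp,
      ih (pre ++ [a]) _ (by simpa using hA), gSpec]
    ring

theorem solve_eq_gSpec (N : Int) (A : List Int) : solve N A = gSpec [] A := by
  have h7 := build_getD7 (PySem.List.enumerate A 0) PySem.Dict.empty PySem.Dict.empty
  have h3 := build_getD3 (PySem.List.enumerate A 0) PySem.Dict.empty PySem.Dict.empty
  have := main_loop A _ _ (fun k => by rw [h7]; rfl) (fun k => by rw [h3]; rfl) A [] 0 rfl
  simpa [solve] using this

-- ===== VERDICT (by name: the statement is the Claim_ definition above) =====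
theorem solve_spec : Claim_equal_solve := by
  intro N A _
  unfold Spec_solve
  rw [solve_eq_gSpec, solve_alt_eq_gSpec]
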